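-- pv_equiv track=rewrite | github.com/vivian-hir/6.009 | recipes_lab.py | ingredient_mixes
-- ===== SOURCE A (Python) =====
-- def make_grocery_list(flat_recipes):
--     """
--     Given a list of flat_recipe dictionaries that map food items to quantities,
--     return a new overall 'grocery list' dictionary that maps each ingredient name
--     to the sum of its quantities across the given flat recipes.
--
--     For example,
--         make_grocery_list([{'milk':1, 'chocolate':1}, {'sugar':1, 'milk':2}])
--     should return:
--         {'milk':3, 'chocolate': 1, 'sugar': 1}
--     """
--     grocery_dict = {}
--     for recipe in flat_recipes:
--         for key in recipe.keys():
--             # enumerate has index, value while dictionary has items too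
--             if (
--                 key in grocery_dict.keys()
--             ):  # if the key is already in the growing grocery_dict
--                 grocery_dict[key] += recipe[
--                     key
--                 ]  # add the recipe's value to the grocery's value
--             else:
--                 grocery_dict.setdefault(
--                     key, recipe[key]
--                 )  # create a new value to grocery_dict
--     return grocery_dict
--
-- def ingredient_mixes(flat_recipes):
--     """
--     Given a list of lists of dictionaries, where each inner list represents all
--     the flat recipes make a certain ingredient as part of a recipe, compute all
--     combinations of the flat recipes.
--     """
--     mix_list = []
--     if len(flat_recipes) == 1:
--         return flat_recipes[0]  # base case is when the length is 1
--     else: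
--         sub_list = flat_recipes[1:]  # list not including first food
--         intermediate = ingredient_mixes(sub_list)  # list of the mixed ingredients
--         for combinations in intermediate:  # loop through all combinations
--             for food in flat_recipes[0]:  # go through the items in first list
--                 mix_list.append(
--                     make_grocery_list([food, combinations])
--                 )  # append item to the list
--     return mix_list
-- ===== SOURCE B (Python) =====
-- def merge_two(food, comb):
--     """Merge two ingredient dicts: food's keys first, quantities summed."""
--     out = dict(food)
--     for key, qty in comb.items():
--         out[key] = out.get(key, 0) + qty
--     return out
--
--
-- def ingredient_mixes(flat_recipes):
--     """
--     Given a list of lists of dictionaries, where each inner list represents all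
--     the flat recipes make a certain ingredient as part of a recipe, compute all
--     combinations of the flat recipes.
--
--     Iterative right-to-left fold instead of recursion: start from the last
--     ingredient's options and extend with each earlier ingredient's options.
--     """
--     acc = flat_recipes[-1]
--     for options in reversed(flat_recipes[:-1]):
--         acc = [merge_two(food, comb) for comb in acc for food in options]
--     return acc
-- ===== Notes on version B (the rewrite author's own statement) =====
-- stated objective: alternative
-- what changed: Replaced A's recursion over the tail (with a general multi-dict grocery-list merger) by an iterative right-to-left fold over the reversed prefix with a dedicated two-dict merge helper.
import Mathlib
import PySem

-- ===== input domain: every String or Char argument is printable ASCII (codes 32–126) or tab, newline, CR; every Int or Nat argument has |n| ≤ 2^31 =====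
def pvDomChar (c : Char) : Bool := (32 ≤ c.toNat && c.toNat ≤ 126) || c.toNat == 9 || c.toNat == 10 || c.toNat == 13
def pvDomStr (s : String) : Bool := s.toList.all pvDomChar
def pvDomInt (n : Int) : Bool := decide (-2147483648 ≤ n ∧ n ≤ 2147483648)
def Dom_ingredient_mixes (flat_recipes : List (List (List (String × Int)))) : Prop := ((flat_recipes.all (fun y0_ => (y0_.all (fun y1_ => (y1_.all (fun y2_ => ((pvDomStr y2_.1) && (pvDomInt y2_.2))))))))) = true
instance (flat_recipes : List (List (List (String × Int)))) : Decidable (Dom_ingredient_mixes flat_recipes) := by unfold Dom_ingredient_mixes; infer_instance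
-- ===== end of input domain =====

-- B replaces A's tail recursion by an iterative right-to-left fold with a two-dict merge (alternative decomposition, same cost).

-- Shared input conversion (both Pythons receive genuine dicts): each inner
-- association list denotes the Python dict built from its pairs.
def pvDictOf (d : List (String × Int)) : PySem.Dict String Int := PySem.Dict.ofList d

-- ===== PORT A =====
-- inner loop of make_grocery_list: 'for key in recipe.keys(): …'
def pvMglStep (g : PySem.Dict String Int) (recipe : PySem.Dict String Int) : PySem.Dict String Int :=
  recipe.keys.foldl
    (fun g k =>
      if g.contains k then g.insert k (g.getD k 0 + recipe.getD k 0)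
      else g.setdefault k (recipe.getD k 0))
    g

def pvMakeGroceryList (recipes : List (PySem.Dict String Int)) : PySem.Dict String Int :=
  recipes.foldl pvMglStep PySem.Dict.empty

-- recursion of A on the dict level ([] is unreachable: Python A never returns there)
def pvMixCore : List (List (PySem.Dict String Int)) → List (PySem.Dict String Int)
  | [] => []
  | [r] => r
  | r :: rest =>
      (pvMixCore rest).foldl
        (fun mix comb => r.foldl (fun mix food => mix ++ [pvMakeGroceryList [food, comb]]) mix)
        []

def ingredient_mixes (flat_recipes : List (List (List (String × Int)))) : List (List (String × Int)) :=
  (pvMixCore (flat_recipes.map (fun L => L.map pvDictOf))).map PySem.Dict.items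

-- ===== PORT B =====
-- merge_two: out = dict(food); for key, qty in comb.items(): out[key] = out.get(key, 0) + qty
def pvMergeTwo (food comb : PySem.Dict String Int) : PySem.Dict String Int :=
  comb.items.foldl (fun out kv => out.insert kv.1 (out.getD kv.1 0 + kv.2)) food

-- acc = flat_recipes[-1]; for options in reversed(flat_recipes[:-1]): acc = [merge_two(food, comb) for comb in acc for food in options]
def pvMixIter (recipes : List (List (PySem.Dict String Int))) : List (PySem.Dict String Int) :=
  (PySem.List.slice recipes none (some (-1))).reverse.foldl
    (fun acc options => acc.flatMap (fun comb => options.map (fun food => pvMergeTwo food comb)))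
    (PySem.List.pyGetD recipes (-1) [])

def ingredient_mixes_alt (flat_recipes : List (List (List (String × Int)))) : List (List (String × Int)) :=
  (pvMixIter (flat_recipes.map (fun L => L.map pvDictOf))).map PySem.Dict.items

-- ===== PRECONDITION & SPEC =====
-- On the empty list A raises RecursionError (and B raises IndexError): excluded.
def Pre_ingredient_mixes (flat_recipes : List (List (List (String × Int)))) : Prop :=
  flat_recipes ≠ []
instance (flat_recipes : List (List (List (String × Int)))) : Decidable (Pre_ingredient_mixes flat_recipes) := by unfold Pre_ingredient_mixes; infer_instance

def pvWitness_ingredient_mixes : (List (List (List (String × Int)))) := [[[("milk", 1)], [("sugar", 2)]], [[("egg", 3)]]]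

def Spec_ingredient_mixes (flat_recipes : List (List (List (String × Int)))) (out : List (List (String × Int))) : Prop := out = ingredient_mixes_alt flat_recipes
instance (flat_recipes : List (List (List (String × Int)))) (out : List (List (String × Int))) : Decidable (Spec_ingredient_mixes flat_recipes out) := by unfold Spec_ingredient_mixes; infer_instance

-- ===== CLAIM (what is proved, stated in full; the proofs are below) =====
def Claim_equal_ingredient_mixes : Prop := ∀ (flat_recipes : List (List (List (String × Int)))), Dom_ingredient_mixes flat_recipes → Pre_ingredient_mixes flat_recipes → Spec_ingredient_mixes flat_recipes (ingredient_mixes flat_recipes)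

-- ===== LEMMAS AND PROOFS =====

-- the common single-key merge step both merge loops reduce to
def pvStep (comb : PySem.Dict String Int) (g : PySem.Dict String Int) (k : String) : PySem.Dict String Int :=
  g.insert k (g.getD k 0 + comb.getD k 0)

theorem pvMglStep_eq_foldl_step (g comb : PySem.Dict String Int) :
    pvMglStep g comb = comb.keys.foldl (pvStep comb) g := by
  unfold pvMglStep
  refine PySem.List.foldl_congr_mem _ _ _ _ (fun g k _ => ?_)
  by_cases h : g.contains k = true
  · simp [h, pvStep]
  · simp only [Bool.not_eq_true] at h
    rw [if_neg (by simp [h]), PySem.Dict.setdefault_of_not_contains _ _ h, pvStep,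
      PySem.Dict.getD_of_not_contains _ _ h, zero_add]

theorem pvMergeTwo_eq_foldl_step (food comb : PySem.Dict String Int)
    (h : comb.keys.Nodup) :
    pvMergeTwo food comb = comb.keys.foldl (pvStep comb) food := by
  unfold pvMergeTwo
  rw [PySem.Dict.items_eq_map_keys comb h 0, List.foldl_map]
  rfl

theorem foldl_step_fresh (comb : PySem.Dict String Int) :
    ∀ (l : List String) (g : PySem.Dict String Int),
    (∀ k ∈ l, g.contains k = false) → l.Nodup →
    (l.foldl (pvStep comb) g).items = g.items ++ l.map (fun k => (k, comb.getD k 0)) := by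
  intro l
  induction l with
  | nil => intro g _ _; simp
  | cons k t ih =>
      intro g hfresh hnd
      have hk : g.contains k = false := hfresh k (by simp)
      have hstep : pvStep comb g k = g.insert k (comb.getD k 0) := by
        rw [pvStep, PySem.Dict.getD_of_not_contains _ _ hk, zero_add]
      rw [List.foldl_cons, hstep, ih]
      · rw [PySem.Dict.items_insert_of_not_contains _ _ hk]
        simp
      · intro k' hk'
        rw [PySem.Dict.contains_insert]
        have : k' ≠ k := by
          rintro rfl; exact (List.nodup_cons.mp hnd).1 hk'
        simp [this, hfresh k' (by simp [hk'])]
      · exact (List.nodup_cons.mp hnd).2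

theorem pvMglStep_empty (food : PySem.Dict String Int) (h : food.keys.Nodup) :
    pvMglStep PySem.Dict.empty food = food := by
  apply PySem.Dict.ext
  rw [pvMglStep_eq_foldl_step, foldl_step_fresh food food.keys PySem.Dict.empty
    (fun k _ => PySem.Dict.contains_empty k) h]
  rw [show (PySem.Dict.empty : PySem.Dict String Int).items = [] from rfl, List.nil_append]
  exact (PySem.Dict.items_eq_map_keys food h 0).symm

theorem pvMakeGroceryList_pair (food comb : PySem.Dict String Int)
    (hf : food.keys.Nodup) (hc : comb.keys.Nodup) :
    pvMakeGroceryList [food, comb] = pvMergeTwo food comb := by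
  unfold pvMakeGroceryList
  rw [List.foldl_cons, List.foldl_cons, List.foldl_nil, pvMglStep_empty food hf,
    pvMglStep_eq_foldl_step, pvMergeTwo_eq_foldl_step food comb hc]

theorem nodup_keys_foldl_step (comb : PySem.Dict String Int) (l : List String)
    (g : PySem.Dict String Int) (h : g.keys.Nodup) :
    (l.foldl (pvStep comb) g).keys.Nodup :=
  PySem.Dict.nodup_keys_foldl_insert l (fun g k => g.getD k 0 + comb.getD k 0) g h

theorem nodup_keys_pvMergeTwo (food comb : PySem.Dict String Int)
    (hf : food.keys.Nodup) (hc : comb.keys.Nodup) :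
    (pvMergeTwo food comb).keys.Nodup := by
  rw [pvMergeTwo_eq_foldl_step food comb hc]
  exact nodup_keys_foldl_step comb comb.keys food hf

-- A's recurrence in flatMap form
theorem pvMixCore_cons (r : List (PySem.Dict String Int))
    (rest : List (List (PySem.Dict String Int))) (h : rest ≠ []) :
    pvMixCore (r :: rest) =
      (pvMixCore rest).flatMap (fun comb => r.map (fun food => pvMakeGroceryList [food, comb])) := by
  obtain ⟨x, t, rfl⟩ := List.exists_cons_of_ne_nil h
  show (pvMixCore (x :: t)).foldl _ [] = _
  rw [PySem.List.foldl_congr_mem (pvMixCore (x :: t)) _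
      (fun mix comb => mix ++ r.map (fun food => pvMakeGroceryList [food, comb])) []
      (fun mix comb _ => PySem.List.foldl_append_singleton_eq_map _ r mix),
    PySem.List.foldl_append_eq_flatMap, List.nil_append]

-- B's recurrence
theorem pvMixIter_singleton (r : List (PySem.Dict String Int)) : pvMixIter [r] = r := by
  unfold pvMixIter
  rw [PySem.List.slice_to_neg_one, PySem.List.pyGetD_neg_one _ _ (by simp)]
  simp

theorem pvMixIter_cons (r : List (PySem.Dict String Int))
    (rest : List (List (PySem.Dict String Int))) (h : rest ≠ []) :
    pvMixIter (r :: rest) =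
      (pvMixIter rest).flatMap (fun comb => r.map (fun food => pvMergeTwo food comb)) := by
  unfold pvMixIter
  rw [PySem.List.slice_to_neg_one, PySem.List.slice_to_neg_one,
    PySem.List.pyGetD_neg_one _ _ (by simp), PySem.List.pyGetD_neg_one _ _ h,
    List.dropLast_cons_of_ne_nil h, List.getLast_cons h, List.reverse_cons,
    List.foldl_append, List.foldl_cons, List.foldl_nil]

-- every dict produced by A's recursion keeps its keys unique
theorem pvMixCore_nodup (rs : List (List (PySem.Dict String Int)))
    (hnd : ∀ L ∈ rs, ∀ d ∈ L, d.keys.Nodup) :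
    ∀ comb ∈ pvMixCore rs, comb.keys.Nodup := by
  induction rs with
  | nil => simp [pvMixCore]
  | cons r rest ih =>
      rcases Decidable.em (rest = []) with rfl | hne
      · simpa [pvMixCore] using hnd r (by simp)
      · intro comb hcomb
        rw [pvMixCore_cons r rest hne] at hcomb
        simp only [List.mem_flatMap, List.mem_map] at hcomb
        obtain ⟨c, hc, food, hfood, rfl⟩ := hcomb
        have hcnd : c.keys.Nodup :=
          ih (fun L hL d hd => hnd L (by simp [hL]) d hd) c hc
        have hfnd : food.keys.Nodup := hnd r (by simp) food hfood
        rw [pvMakeGroceryList_pair food c hfnd hcnd]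
        exact nodup_keys_pvMergeTwo food c hfnd hcnd

theorem pvMixCore_eq_pvMixIter (rs : List (List (PySem.Dict String Int)))
    (h : rs ≠ []) (hnd : ∀ L ∈ rs, ∀ d ∈ L, d.keys.Nodup) :
    pvMixCore rs = pvMixIter rs := by
  induction rs with
  | nil => exact absurd rfl h
  | cons r rest ih =>
      rcases Decidable.em (rest = []) with rfl | hne
      · rw [pvMixIter_singleton]; rfl
      · have hndrest : ∀ L ∈ rest, ∀ d ∈ L, d.keys.Nodup :=
          fun L hL d hd => hnd L (by simp [hL]) d hd
        rw [pvMixCore_cons r rest hne, pvMixIter_cons r rest hne, ← ih hne hndrest]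
        refine List.flatMap_congr (fun comb hcomb => ?_)
        refine List.map_congr_left (fun food hfood => ?_)
        exact pvMakeGroceryList_pair food comb (hnd r (by simp) food hfood)
          (pvMixCore_nodup rest hndrest comb hcomb)

-- ===== VERDICT (by name: the statement is the Claim_ definition above) =====
theorem ingredient_mixes_spec : Claim_equal_ingredient_mixes := by
  intro fr _ hpre
  unfold Spec_ingredient_mixes ingredient_mixes ingredient_mixes_alt
  rw [pvMixCore_eq_pvMixIter]
  · simpa using hpre
  · intro L hL d hd
    simp only [List.mem_map] at hL
    obtain ⟨L0, _, rfl⟩ := hL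
    simp only [List.mem_map] at hd
    obtain ⟨d0, _, rfl⟩ := hd
    exact PySem.Dict.nodup_keys_ofList d0
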